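-- pv_equiv track=rewrite | github.com/GBeurier/nirs4all | nirs4all/data/ensemble_utils.py | _is_higher_better
-- ===== SOURCE A (Python) =====
-- def _is_higher_better(metric: str) -> bool:
--     """
--     Determine if higher values are better for a given metric.
--
--     Args:
--         metric: Metric name
--
--     Returns:
--         True if higher is better, False if lower is better
--     """
--     # Metrics where higher is better
--     higher_better_metrics = {
--         'r2', 'accuracy', 'f1', 'precision', 'recall',
--         'auc', 'roc_auc', 'score'
--     }
--
--     # Metrics where lower is better
--     lower_better_metrics = {
--         'mse', 'rmse', 'mae', 'loss', 'error',
--         'mean_squared_error', 'mean_absolute_error', 'root_mean_squared_error'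
--     }
--
--     metric_lower = metric.lower()
--
--     if metric_lower in higher_better_metrics:
--         return True
--     elif metric_lower in lower_better_metrics:
--         return False
--     else:
--         # Default assumption: if it contains 'error', 'loss', or 'mse', lower is better
--         if any(term in metric_lower for term in ['error', 'loss', 'mse', 'mae']):
--             return False
--         else:
--             # Default to higher is better for unknown metrics
--             return True
-- ===== SOURCE B (Python) =====
-- def _is_higher_better(metric: str) -> bool:
--     metric_lower = metric.lower()
--     return not any(term in metric_lower for term in ['error', 'loss', 'mse', 'mae'])
-- ===== Notes on version B (the rewrite author's own statement) =====
-- stated objective: simpler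
-- what changed: Both lookup sets are redundant (every lower-better name contains 'error'/'loss'/'mse'/'mae' as a substring and no higher-better name does), so B drops both sets and the branch chain and returns the negated substring scan directly.
import Mathlib
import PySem

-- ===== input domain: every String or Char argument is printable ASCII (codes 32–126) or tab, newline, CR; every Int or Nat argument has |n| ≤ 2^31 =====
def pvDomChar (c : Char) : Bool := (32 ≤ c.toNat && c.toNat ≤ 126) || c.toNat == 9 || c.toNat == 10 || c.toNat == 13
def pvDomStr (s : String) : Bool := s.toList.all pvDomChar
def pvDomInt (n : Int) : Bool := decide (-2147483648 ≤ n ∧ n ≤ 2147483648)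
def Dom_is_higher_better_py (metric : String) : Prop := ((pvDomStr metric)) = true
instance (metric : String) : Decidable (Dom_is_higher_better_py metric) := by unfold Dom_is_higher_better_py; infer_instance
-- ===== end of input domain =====

-- B drops A's two redundant lookup sets (every lower-better name contains one of the
-- fallback substrings, no higher-better name does) and keeps only the substring scan.

-- ===== PORT A =====
def is_higher_better_py (metric : String) : Bool :=
  let higher_better_metrics : PySem.Set String :=
    PySem.Set.ofList ["r2", "accuracy", "f1", "precision", "recall", "auc", "roc_auc", "score"]
  let lower_better_metrics : PySem.Set String :=
    PySem.Set.ofList ["mse", "rmse", "mae", "loss", "error",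
      "mean_squared_error", "mean_absolute_error", "root_mean_squared_error"]
  let metric_lower := PySem.Str.lower metric
  if PySem.Set.contains higher_better_metrics metric_lower then true
  else if PySem.Set.contains lower_better_metrics metric_lower then false
  else if ["error", "loss", "mse", "mae"].any (fun term => PySem.Str.isIn term metric_lower) then
    false
  else true

-- ===== PORT B =====
def is_higher_better_py_alt (metric : String) : Bool :=
  let metric_lower := PySem.Str.lower metric
  !(["error", "loss", "mse", "mae"].any (fun term => PySem.Str.isIn term metric_lower))

-- ===== PRECONDITION & SPEC =====
def Spec_is_higher_better_py (metric : String) (out : Bool) : Prop := out = is_higher_better_py_alt metric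
instance (metric : String) (out : Bool) : Decidable (Spec_is_higher_better_py metric out) := by unfold Spec_is_higher_better_py; infer_instance

-- ===== CLAIM (what is proved, stated in full; the proofs are below) =====
def Claim_equal_is_higher_better_py : Prop := ∀ (metric : String), Dom_is_higher_better_py metric → Spec_is_higher_better_py metric (is_higher_better_py metric)

-- ===== LEMMAS AND PROOFS =====

-- the fallback substring scan, as a function of the already-lowered string
def pvScan (m : String) : Bool :=
  ["error", "loss", "mse", "mae"].any (fun term => PySem.Str.isIn term m)

-- A's branch chain collapses to the fallback scan, for any lowered string m:
-- every higher-better literal fails the scan, every lower-better literal passes it.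
theorem pvKey (m : String) :
    (if PySem.Set.contains
         (PySem.Set.ofList ["r2", "accuracy", "f1", "precision", "recall", "auc", "roc_auc", "score"]) m then true
     else if PySem.Set.contains
         (PySem.Set.ofList ["mse", "rmse", "mae", "loss", "error",
           "mean_squared_error", "mean_absolute_error", "root_mean_squared_error"]) m then false
     else if pvScan m then false else true) = !pvScan m := by
  by_cases h1 : PySem.Set.contains
      (PySem.Set.ofList ["r2", "accuracy", "f1", "precision", "recall", "auc", "roc_auc", "score"]) m = true
  · have hmem := (PySem.Set.contains_iff _ _).mp h1
    simp only [PySem.Set.mem_ofList, List.mem_cons, List.not_mem_nil, or_false] at hmem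
    rcases hmem with rfl|rfl|rfl|rfl|rfl|rfl|rfl|rfl <;> decide
  · by_cases h2 : PySem.Set.contains
        (PySem.Set.ofList ["mse", "rmse", "mae", "loss", "error",
          "mean_squared_error", "mean_absolute_error", "root_mean_squared_error"]) m = true
    · have hmem := (PySem.Set.contains_iff _ _).mp h2
      simp only [PySem.Set.mem_ofList, List.mem_cons, List.not_mem_nil, or_false] at hmem
      rcases hmem with rfl|rfl|rfl|rfl|rfl|rfl|rfl|rfl <;> decide
    · rw [if_neg h1, if_neg h2]
      cases hs : pvScan m <;> simp

theorem pvA_eq (metric : String) :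
    is_higher_better_py metric = !pvScan (PySem.Str.lower metric) :=
  pvKey (PySem.Str.lower metric)

-- ===== VERDICT (by name: the statement is the Claim_ definition above) =====
theorem is_higher_better_py_spec : Claim_equal_is_higher_better_py := by
  intro metric _
  unfold Spec_is_higher_better_py
  rw [pvA_eq]
  rfl
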